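-- pv_equiv track=rewrite | github.com/dhirajpatil2346/compitative | codechef/starter 93/5.py | count_good_removals
-- ===== SOURCE A (Python) =====
-- def count_good_removals(A):
--     N = len(A)
--     dp = [0] * N
--     even_count = 0
--     mod = 10**9 + 7
--
--     for i in range(N):
--         if A[i] % 2 == 0:
--             dp[i] = (dp[i-1] + even_count + 1) % mod
--             even_count += 1
--         else:
--             dp[i] = dp[i-1]
--
--     return dp[N-1]
-- ===== SOURCE B (Python) =====
-- def count_good_removals(A):
--     k = sum(1 for x in A if x % 2 == 0)
--     return (k * (k + 1) // 2) % (10**9 + 7)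
-- ===== Notes on version B (the rewrite author's own statement) =====
-- stated objective: simpler
-- what changed: Replaced the O(n)-space DP array (dp[i] accumulating prior_even_count+1 per even element) by the closed form: count k = number of even elements and return k*(k+1)//2 mod 1e9+7; constant-factor faster by dropping the dp list allocation and per-element writes.
import Mathlib
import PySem

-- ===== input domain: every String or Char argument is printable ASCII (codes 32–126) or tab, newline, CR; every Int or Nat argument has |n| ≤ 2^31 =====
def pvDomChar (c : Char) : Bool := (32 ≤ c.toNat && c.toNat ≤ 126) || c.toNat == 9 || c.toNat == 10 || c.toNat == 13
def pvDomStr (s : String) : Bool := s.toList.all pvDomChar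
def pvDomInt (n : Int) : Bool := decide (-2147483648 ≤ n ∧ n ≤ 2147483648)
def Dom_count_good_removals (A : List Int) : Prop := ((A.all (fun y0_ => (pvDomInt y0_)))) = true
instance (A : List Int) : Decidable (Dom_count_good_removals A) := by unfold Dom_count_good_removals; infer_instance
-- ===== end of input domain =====

-- B replaces A's O(n)-space DP array by the closed form k*(k+1)//2 mod 1e9+7 where k = number of even elements (simpler; return value only).


-- ===== PORT A =====
-- literal transliteration: dp array of length N, even_count, loop over range(N); dp[i-1] via pyGetD (negative index wraps), final dp[N-1]
def count_good_removals (A : List Int) : Int :=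
  let N : Int := A.length
  let dp0 : List Int := List.replicate N.toNat 0
  let mod : Int := 10 ^ 9 + 7
  let st :=
    (PySem.List.pyRange 0 N 1).foldl
      (fun (st : List Int × Int) i =>
        if PySem.Int.mod (PySem.List.pyGetD A i 0) 2 == 0 then
          (PySem.List.pySetD st.1 i
             (PySem.Int.mod (PySem.List.pyGetD st.1 (i - 1) 0 + st.2 + 1) mod), st.2 + 1)
        else
          (PySem.List.pySetD st.1 i (PySem.List.pyGetD st.1 (i - 1) 0), st.2))
      (dp0, 0)
  PySem.List.pyGetD st.1 (N - 1) 0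

-- ===== PORT B =====
def count_good_removals_alt (A : List Int) : Int :=
  let k : Int := A.foldl (fun acc x => if PySem.Int.mod x 2 == 0 then acc + 1 else acc) 0
  PySem.Int.mod (PySem.Int.floordiv (k * (k + 1)) 2) (10 ^ 9 + 7)

-- ===== PRECONDITION & SPEC =====
-- Pre_ excludes only the empty list, on which A raises IndexError (dp[-1] of an empty dp)
def Pre_count_good_removals (A : List Int) : Prop := A ≠ []
instance (A : List Int) : Decidable (Pre_count_good_removals A) := by unfold Pre_count_good_removals; infer_instance
def pvWitness_count_good_removals : List Int := [2, 3, 4]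

def Spec_count_good_removals (A : List Int) (out : Int) : Prop := out = count_good_removals_alt A
instance (A : List Int) (out : Int) : Decidable (Spec_count_good_removals A out) := by unfold Spec_count_good_removals; infer_instance

-- ===== CLAIM (what is proved, stated in full; the proofs are below) =====
def Claim_equal_count_good_removals : Prop := ∀ (A : List Int), Dom_count_good_removals A → Pre_count_good_removals A → Spec_count_good_removals A (count_good_removals A)

-- ===== LEMMAS AND PROOFS =====

-- number of even elements among the first j entries
def pvEc (A : List Int) (j : Nat) : Nat := (A.take j).countP (fun x => PySem.Int.mod x 2 == 0)

-- triangular number k*(k+1)/2 (Int, k >= 0 so ediv matches Python's //)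
def pvTri (k : Nat) : Int := (k : Int) * ((k : Int) + 1) / 2

-- the dp array after the first j loop iterations
def pvDp (A : List Int) (j : Nat) : List Int :=
  (List.range A.length).map (fun i => if i < j then pvTri (pvEc A (i + 1)) % (10 ^ 9 + 7) else 0)

theorem pvTri_succ (k : Nat) : pvTri (k + 1) = pvTri k + (k : Int) + 1 := by
  unfold pvTri
  push_cast
  rw [show ((k : Int) + 1) * ((k : Int) + 1 + 1) = (k : Int) * ((k : Int) + 1) + ((k : Int) + 1) * 2 by ring,
      Int.add_mul_ediv_right _ _ (by norm_num)]
  ring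

theorem pvEc_succ (A : List Int) (j : Nat) (h : j < A.length) :
    pvEc A (j + 1) = pvEc A j + (if PySem.Int.mod A[j] 2 == 0 then 1 else 0) := by
  unfold pvEc
  rw [List.take_add_one, List.countP_append]
  simp [List.getElem?_eq_getElem h, List.countP_cons]

theorem pvDp_zero (A : List Int) : pvDp A 0 = List.replicate A.length 0 := by
  unfold pvDp
  simp

theorem pvDp_getD (A : List Int) (j i : Nat) (hi : i < A.length) :
    (pvDp A j).getD i 0 = if i < j then pvTri (pvEc A (i + 1)) % (10 ^ 9 + 7) else 0 := by
  unfold pvDp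
  rw [List.getD_eq_getElem?_getD]
  simp [hi]

theorem pvDp_length (A : List Int) (j : Nat) : (pvDp A j).length = A.length := by
  simp [pvDp]

theorem pvDp_set (A : List Int) (j : Nat) (_hj : j < A.length) :
    (pvDp A j).set j (pvTri (pvEc A (j + 1)) % (10 ^ 9 + 7)) = pvDp A (j + 1) := by
  apply List.ext_getElem
  · simp [pvDp]
  · intro i h1 h2
    rw [List.getElem_set]
    unfold pvDp at *
    simp only [List.getElem_map, List.getElem_range] at *
    split
    · rename_i heq; subst heq; simp
    · rename_i hne
      by_cases h : i < j
      · simp [h, Nat.lt_succ_of_lt h]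
      · have h2 : ¬ i < j + 1 := by omega
        simp [h, h2]

-- the value read as dp[i-1] at step j equals pvTri (pvEc A j) % p
theorem pvRead (A : List Int) (j : Nat) (hj : j < A.length) :
    PySem.List.pyGetD (pvDp A j) ((j : Int) - 1) 0 = pvTri (pvEc A j) % (10 ^ 9 + 7) := by
  cases j with
  | zero =>
    rw [show ((0 : Nat) : Int) - 1 = -((1 : Nat) : Int) by simp]
    rw [PySem.List.pyGetD_neg_natCast _ _ _ (by omega) (by rw [pvDp_length]; omega)]
    simp [pvDp, pvEc, pvTri]
  | succ m =>
    rw [show ((m + 1 : Nat) : Int) - 1 = ((m : Nat) : Int) by push_cast; ring]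
    rw [PySem.List.pyGetD_natCast]
    rw [pvDp_getD A (m + 1) m (by omega)]
    simp

-- loop invariant: after folding over range j, the state is (pvDp A j, pvEc A j)
theorem pvLoop (A : List Int) (j : Nat) (hj : j ≤ A.length) :
    ((List.range j).map (fun k => ((0 : Int) + (k : Nat)))).foldl
      (fun (st : List Int × Int) i =>
        if PySem.Int.mod (PySem.List.pyGetD A i 0) 2 == 0 then
          (PySem.List.pySetD st.1 i
             (PySem.Int.mod (PySem.List.pyGetD st.1 (i - 1) 0 + st.2 + 1) (10 ^ 9 + 7)), st.2 + 1)
        else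
          (PySem.List.pySetD st.1 i (PySem.List.pyGetD st.1 (i - 1) 0), st.2))
      (List.replicate A.length 0, 0)
    = (pvDp A j, (pvEc A j : Int)) := by
  induction j with
  | zero => simp [pvDp_zero, pvEc]
  | succ m ih =>
    have hm : m < A.length := by omega
    rw [List.range_succ, List.map_append, List.foldl_append, ih (by omega)]
    simp only [List.map_cons, List.map_nil, List.foldl_cons, List.foldl_nil, zero_add]
    have hget : PySem.List.pyGetD A ((m : Nat) : Int) 0 = A[m] := by
      rw [PySem.List.pyGetD_natCast]; exact List.getD_eq_getElem A 0 hm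
    have hread := pvRead A m hm
    have hset : ∀ v : Int, PySem.List.pySetD (pvDp A m) ((m : Nat) : Int) v = (pvDp A m).set m v := by
      intro v; rw [PySem.List.pySetD_natCast]
    by_cases hev : PySem.Int.mod A[m] 2 == 0
    · have hec : pvEc A (m + 1) = pvEc A m + 1 := by
        rw [pvEc_succ A m hm, if_pos hev]
      have hval : PySem.Int.mod (pvTri (pvEc A m) % (10 ^ 9 + 7) + (pvEc A m : Int) + 1) (10 ^ 9 + 7)
          = pvTri (pvEc A (m + 1)) % (10 ^ 9 + 7) := by
        rw [PySem.Int.mod_eq_emod_of_pos (by norm_num), hec, pvTri_succ]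
        omega
      simp only [hget, hread, hset]
      rw [if_pos hev, hval, pvDp_set A m hm, hec]
      norm_cast
    · have hec : pvEc A (m + 1) = pvEc A m := by
        rw [pvEc_succ A m hm, if_neg hev]
        omega
      simp only [hget, hread, hset]
      rw [if_neg hev, ← hec, pvDp_set A m hm]

theorem pvAlt_eq (A : List Int) :
    count_good_removals_alt A = pvTri (A.countP (fun x => PySem.Int.mod x 2 == 0)) % (10 ^ 9 + 7) := by
  unfold count_good_removals_alt
  rw [PySem.List.foldl_count_if]
  rw [PySem.Int.mod_eq_emod_of_pos (by norm_num), PySem.Int.floordiv_eq_ediv_of_pos (by norm_num)]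
  simp [pvTri]

-- ===== VERDICT (by name: the statement is the Claim_ definition above) =====
theorem count_good_removals_spec : Claim_equal_count_good_removals := by
  intro A _ hA
  unfold Spec_count_good_removals count_good_removals
  simp only []
  have hlen : 0 < A.length := List.length_pos_iff.mpr hA
  rw [PySem.List.pyRange_one]
  simp only [sub_zero, Int.toNat_natCast]
  rw [pvLoop A A.length le_rfl]
  dsimp only
  rw [show ((A.length : Int) - 1) = (((A.length - 1 : Nat)) : Int) by omega]
  rw [PySem.List.pyGetD_natCast]
  rw [pvDp_getD A A.length (A.length - 1) (by omega)]
  rw [if_pos (by omega), show A.length - 1 + 1 = A.length by omega]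
  rw [pvAlt_eq]
  simp [pvEc]
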